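-- pv_equiv track=rewrite | github.com/Sonnenritter/Compysition | helperfunctions.py | notishift
-- ===== SOURCE A (Python) =====
-- def notishift(a, b, shift=0):
--     new_notes = []
--     n = 0
--     len_a = len(a)
--     len_b = len(b)
--     notes_lcm = lcm(len_a, len_b)
--     while n < notes_lcm:
--         new_notes.append(a[n % len_a] + b[(n + shift) % len_b])
--         n += 1
--     return new_notes
--
-- def gcd(a, b):
--     """Return greatest common divisor using Euclid's Algorithm."""
--     while b:
--         a, b = b, a % b
--     return a
--
-- def lcm(a, b):
--     """Return lowest common multiple."""
--     return a * b // gcd(a, b)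
-- ===== SOURCE B (Python) =====
-- def gcd(a, b):
--     """Return greatest common divisor using Euclid's Algorithm."""
--     while b:
--         a, b = b, a % b
--     return a
--
--
-- def notishift(a, b, shift=0):
--     len_a = len(a)
--     len_b = len(b)
--     if len_a == 0 or len_b == 0:
--         return []
--     total = len_a * len_b // gcd(len_a, len_b)
--     s = shift % len_b
--     b_rot = b[s:] + b[:s]
--     expanded_a = a * (total // len_a)
--     expanded_b = b_rot * (total // len_b)
--     return [x + y for x, y in zip(expanded_a, expanded_b)]
-- ===== Notes on version B (the rewrite author's own statement) =====
-- stated objective: faster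
-- what changed: Replaces the per-element modular-indexing while-loop with rotate-by-shift, tile both lists to the lcm length, then one flat zip-and-add pass.
import Mathlib
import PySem

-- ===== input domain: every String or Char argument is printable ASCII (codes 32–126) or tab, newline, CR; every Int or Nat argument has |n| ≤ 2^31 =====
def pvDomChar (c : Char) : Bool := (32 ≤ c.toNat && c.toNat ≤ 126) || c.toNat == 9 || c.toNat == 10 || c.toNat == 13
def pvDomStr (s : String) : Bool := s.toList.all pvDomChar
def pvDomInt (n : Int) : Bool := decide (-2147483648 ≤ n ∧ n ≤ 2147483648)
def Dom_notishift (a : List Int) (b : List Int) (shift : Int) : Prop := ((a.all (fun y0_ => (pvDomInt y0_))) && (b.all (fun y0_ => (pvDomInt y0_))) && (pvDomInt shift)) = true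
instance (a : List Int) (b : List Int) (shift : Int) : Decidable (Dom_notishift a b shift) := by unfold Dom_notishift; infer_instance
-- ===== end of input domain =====

-- B replaces A's per-element modular indexing by rotate-then-tile-then-zip (one flat combine pass); same return value on Pre_.

-- ===== PORT A =====
-- termination helper for the Euclid loop (cited by pyGcd's decreasing_by)
lemma pyGcd_dec {a b : Int} (h : ¬ b = 0) : (PySem.Int.mod a b).natAbs < b.natAbs := by
  rcases lt_or_gt_of_ne h with hb | hb
  · have := PySem.Int.mod_neg_bounds a hb; omega
  · have h1 := PySem.Int.mod_nonneg a hb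
    have h2 := PySem.Int.mod_lt a hb; omega

-- helper gcd: 'while b: a, b = b, a % b; return a'
def pyGcd (a b : Int) : Int :=
  if h : b = 0 then a
  else pyGcd b (PySem.Int.mod a b)
termination_by b.natAbs
decreasing_by exact pyGcd_dec h

-- helper lcm: 'return a * b // gcd(a, b)'
def pyLcm (a b : Int) : Int := PySem.Int.floordiv (a * b) (pyGcd a b)

def notishift (a : List Int) (b : List Int) (shift : Int) : List Int :=
  let len_a : Int := a.length
  let len_b : Int := b.length
  let notes_lcm := pyLcm len_a len_b
  (PySem.List.pyRange 0 notes_lcm 1).foldl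
    (fun new_notes n =>
      new_notes ++ [PySem.List.pyGetD a (PySem.Int.mod n len_a) 0
                    + PySem.List.pyGetD b (PySem.Int.mod (n + shift) len_b) 0]) []

-- ===== PORT B =====
def notishift_alt (a : List Int) (b : List Int) (shift : Int) : List Int :=
  let len_a : Int := a.length
  let len_b : Int := b.length
  if len_a = 0 ∨ len_b = 0 then []
  else
    let total := PySem.Int.floordiv (len_a * len_b) (pyGcd len_a len_b)
    let s := PySem.Int.mod shift len_b
    let b_rot := PySem.List.slice b (some s) none ++ PySem.List.slice b none (some s)
    let expanded_a := PySem.List.pyRepeat a (PySem.Int.floordiv total len_a)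
    let expanded_b := PySem.List.pyRepeat b_rot (PySem.Int.floordiv total len_b)
    (expanded_a.zip expanded_b).map (fun p => p.1 + p.2)

-- ===== PRECONDITION & SPEC =====
-- Pre_ excludes only a = [] ∧ b = [], where A raises ZeroDivisionError (lcm(0,0) divides by gcd(0,0) = 0).
def Pre_notishift (a : List Int) (b : List Int) (shift : Int) : Prop := ¬ (a = [] ∧ b = [])
instance (a : List Int) (b : List Int) (shift : Int) : Decidable (Pre_notishift a b shift) := by unfold Pre_notishift; infer_instance
def pvWitness_notishift : List Int × List Int × Int := ([1, 2], [3, 4, 5], 1)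

def Spec_notishift (a : List Int) (b : List Int) (shift : Int) (out : List Int) : Prop := out = notishift_alt a b shift
instance (a : List Int) (b : List Int) (shift : Int) (out : List Int) : Decidable (Spec_notishift a b shift out) := by unfold Spec_notishift; infer_instance

-- ===== CLAIM (what is proved, stated in full; the proofs are below) =====
def Claim_equal_notishift : Prop := ∀ (a : List Int) (b : List Int) (shift : Int), Dom_notishift a b shift → Pre_notishift a b shift → Spec_notishift a b shift (notishift a b shift)
-- ===== LEMMAS AND PROOFS =====

lemma pyGcd_natCast (m n : Nat) : pyGcd (m : Int) (n : Int) = (Nat.gcd m n : Int) := by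
  induction n using Nat.strong_induction_on generalizing m with
  | _ n ih =>
    rw [pyGcd]
    split_ifs with hn
    · have : n = 0 := by exact_mod_cast hn
      subst this; simp
    · have hn0 : n ≠ 0 := by intro h; exact hn (by exact_mod_cast h)
      rw [PySem.Int.mod_natCast, ih (m % n) (Nat.mod_lt _ (Nat.pos_of_ne_zero hn0)) n]
      rw [Nat.gcd_comm m n, Nat.gcd_rec n m, Nat.gcd_comm]

lemma pyLcm_natCast (m n : Nat) : pyLcm (m : Int) (n : Int) = (Nat.lcm m n : Int) := by
  rw [pyLcm, pyGcd_natCast]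
  have h : ((m : Int) * (n : Int)) = ((m * n : Nat) : Int) := by push_cast; ring
  rw [h, PySem.Int.floordiv_natCast]
  rfl

lemma len_flatten_replicate {α : Type} (c : Nat) (xs : List α) :
    ((List.replicate c xs).flatten).length = c * xs.length := by
  induction c with
  | zero => simp
  | succ c ih => rw [List.replicate_succ, List.flatten_cons, List.length_append, ih, Nat.succ_mul]; ring

lemma flatten_replicate_getElem? {α : Type} (c k : Nat) (xs : List α) (hk : k < c * xs.length) :
    ((List.replicate c xs).flatten)[k]? = xs[k % xs.length]? := by
  induction c generalizing k with
  | zero => simp at hk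
  | succ c ih =>
    have hxs : 0 < xs.length := by by_contra h; push_neg at h; interval_cases h' : xs.length <;> omega
    rw [List.replicate_succ, List.flatten_cons, List.getElem?_append]
    by_cases h : k < xs.length
    · rw [if_pos h, Nat.mod_eq_of_lt h]
    · rw [if_neg h]
      have h' : xs.length ≤ k := Nat.le_of_not_lt h
      have hk' : k - xs.length < c * xs.length := by rw [Nat.succ_mul] at hk; omega
      rw [ih (k - xs.length) hk']
      congr 1
      conv_rhs => rw [← Nat.sub_add_cancel h', Nat.add_mod_right]

lemma rot_getElem? {α : Type} (b : List α) (s j : Nat) (hs : s < b.length) (hj : j < b.length) :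
    (b.drop s ++ b.take s)[j]? = b[(j + s) % b.length]? := by
  rw [List.getElem?_append]
  by_cases h : j < b.length - s
  · rw [if_pos (by simp; omega), List.getElem?_drop]
    congr 1
    rw [Nat.mod_eq_of_lt (by omega)]
    omega
  · rw [if_neg (by simp; omega), List.getElem?_take]
    rw [if_pos (by simp; omega)]
    congr 1
    have h1 : b.length ≤ j + s := by omega
    rw [Nat.mod_eq_sub_mod h1, Nat.mod_eq_of_lt (by omega)]
    simp
    omega

-- ===== VERDICT (by name: the statement is the Claim_ definition above) =====
theorem notishift_spec : Claim_equal_notishift := by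
  intro a b shift _ hpre
  unfold Spec_notishift notishift notishift_alt
  simp only []
  by_cases hm : a.length = 0
  · have ha : a = [] := List.eq_nil_of_length_eq_zero hm
    subst ha
    have hlcm : pyLcm ((List.length ([] : List Int)) : Int) ((b.length : Nat) : Int) = 0 := by
      rw [show ((List.length ([] : List Int)) : Int) = ((0 : Nat) : Int) by simp, pyLcm_natCast]
      simp
    rw [hlcm]
    rw [if_pos (Or.inl (by simp))]
    rfl
  · by_cases hn : b.length = 0
    · have hb : b = [] := List.eq_nil_of_length_eq_zero hn
      subst hb
      have hlcm : pyLcm ((a.length : Nat) : Int) ((List.length ([] : List Int)) : Int) = 0 := by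
        rw [show ((List.length ([] : List Int)) : Int) = ((0 : Nat) : Int) by simp, pyLcm_natCast]
        simp
      rw [hlcm]
      rw [if_pos (Or.inr (by simp))]
      rfl
    · -- main case: both lists nonempty
      have hm' : 0 < a.length := Nat.pos_of_ne_zero hm
      have hn' : 0 < b.length := Nat.pos_of_ne_zero hn
      rw [if_neg (by simp [hm, hn])]
      set m := a.length with hmdef
      set n := b.length with hndef
      set L := Nat.lcm m n with hLdef
      have hLm : L / m * m = L := Nat.div_mul_cancel (Nat.dvd_lcm_left m n)
      have hLn : L / n * n = L := Nat.div_mul_cancel (Nat.dvd_lcm_right m n)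
      rw [pyLcm_natCast m n, PySem.List.pyRange_zero_natCast,
          PySem.List.foldl_append_singleton_eq_map, List.nil_append, List.map_map]
      have htot : PySem.Int.floordiv ((m : Int) * (n : Int)) (pyGcd (m : Int) (n : Int)) = (L : Int) := by
        rw [pyGcd_natCast, show ((m : Int) * (n : Int)) = ((m * n : Nat) : Int) by push_cast; ring,
            PySem.Int.floordiv_natCast]
        rfl
      rw [htot, show PySem.Int.floordiv (L : Int) (m : Int) = ((L / m : Nat) : Int) from PySem.Int.floordiv_natCast L m,
          show PySem.Int.floordiv (L : Int) (n : Int) = ((L / n : Nat) : Int) from PySem.Int.floordiv_natCast L n]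
      set s := PySem.Int.mod shift (n : Int) with hsdef
      have hnpos : (0 : Int) < (n : Int) := by exact_mod_cast hn'
      have hs0 : 0 ≤ s := PySem.Int.mod_nonneg shift hnpos
      have hsltI : s < (n : Int) := PySem.Int.mod_lt shift hnpos
      set sN := s.toNat with hsNdef
      have hscast : s = (sN : Int) := (Int.toNat_of_nonneg hs0).symm
      have hsN : sN < n := by omega
      rw [hscast, PySem.List.slice_from_natCast, PySem.List.slice_to_natCast]
      simp only [PySem.List.pyRepeat, Int.toNat_natCast]
      have hrotlen : (b.drop sN ++ b.take sN).length = n := by simp; omega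
      apply List.ext_getElem?
      intro i
      rw [List.getElem?_map, List.getElem?_map, List.zip_eq_zipWith, List.getElem?_zipWith]
      by_cases hi : i < L
      · have hia : ((List.replicate (L / m) a).flatten)[i]? = some (a[i % m]'(Nat.mod_lt _ hm')) := by
          rw [flatten_replicate_getElem? _ _ _ (show i < (L / m) * a.length by rw [← hmdef, hLm]; exact hi)]
          exact List.getElem?_eq_getElem (Nat.mod_lt _ hm')
        have hib : ((List.replicate (L / n) (b.drop sN ++ b.take sN)).flatten)[i]? =
            some (b[(i % n + sN) % n]'(Nat.mod_lt _ hn')) := by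
          rw [flatten_replicate_getElem? _ _ _
                (show i < (L / n) * (b.drop sN ++ b.take sN).length by rw [hrotlen, hLn]; exact hi)]
          rw [hrotlen, rot_getElem? b sN (i % n) hsN (Nat.mod_lt _ hn')]
          exact List.getElem?_eq_getElem (Nat.mod_lt _ hn')
        rw [List.getElem?_range hi, hia, hib]
        have ht : PySem.Int.mod ((i : Int) + shift) (n : Int) = (((i % n + sN) % n : Nat) : Int) := by
          rw [PySem.Int.mod_eq_emod_of_pos hnpos]
          have hs' : (sN : Int) = shift % (n : Int) := by
            rw [← hscast, hsdef, PySem.Int.mod_eq_emod_of_pos hnpos]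
          push_cast
          rw [hs', ← Int.add_emod]
        simp only [Option.map_some, Function.comp_apply]
        congr 1
        rw [PySem.Int.mod_natCast, PySem.List.pyGetD_natCast,
            List.getD_eq_getElem _ _ (Nat.mod_lt _ hm'), ht, PySem.List.pyGetD_natCast,
            List.getD_eq_getElem _ _ (Nat.mod_lt _ hn')]
      · have hiL : L ≤ i := Nat.le_of_not_lt hi
        rw [List.getElem?_eq_none (by simpa using hiL)]
        rw [List.getElem?_eq_none (show (List.replicate (L / m) a).flatten.length ≤ i by
              rw [len_flatten_replicate, ← hmdef, hLm]; exact hiL)]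
        simp
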